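-- pv_equiv track=rewrite | github.com/svanis71/adventofcode | 2020/day16/__init__.py | analyse_columns
-- ===== SOURCE A (Python) =====
-- def analyse_columns(fields, pivot):
--     column_field_candidates = {}
--     ticket_fields = {name: -1 for name in fields}
--     for ix, column in enumerate(pivot):  # (3,15,18)
--         column_field_candidates[ix] = []
--         for field_ix, (field, val) in enumerate(fields.items()):
--             if all(x in val for x in column):
--                 column_field_candidates[ix].append(field)
--     while True:
--         if all(-1 != v for v in ticket_fields.values()):
--             break
--         for colnr, candidate_list in enumerate(column_field_candidates.items()):
--             adjusted_list = [cand for cand in candidate_list[1] if ticket_fields[cand] == -1]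
--             column_field_candidates[colnr] = adjusted_list
--             if len(adjusted_list) == 1:
--                 ticket_fields[column_field_candidates[colnr].pop(0)] = candidate_list[0]
--     return ticket_fields
-- ===== SOURCE B (Python) =====
-- def analyse_columns(fields, pivot):
--     # Bit-parallel reimplementation: an inverted value -> field-bitmask index built
--     # once replaces A's nested per-column membership scans, and each column's
--     # candidate bookkeeping is a single integer bitmask cleared with bulk bitwise
--     # operations instead of re-filtered name lists.
--     names = list(fields)
--     n = len(names)
--     vmask = {}
--     for i, vals in enumerate(fields.values()):
--         bit = 1 << i
--         for v in vals:
--             vmask[v] = vmask.get(v, 0) | bit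
--     full = (1 << n) - 1
--     masks = []
--     for column in pivot:
--         m = full
--         for x in column:
--             m &= vmask.get(x, 0)
--         masks.append(m)
--     pos = [-1] * n
--     done = 0
--     while done != full:
--         progress = False
--         for ix in range(len(masks)):
--             r = masks[ix] & (full ^ done)
--             masks[ix] = r
--             if r.bit_count() == 1:
--                 pos[r.bit_length() - 1] = ix
--                 done |= r
--                 masks[ix] = 0
--                 progress = True
--         if not progress:
--             break
--     return {name: pos[i] for i, name in enumerate(names)}
-- ===== Notes on version B (the rewrite author's own statement) =====
-- stated objective: alternative
-- what changed: A stores per-column candidate NAME LISTS and each sweep re-filters every list against the assignment dict with nested membership scans; B builds an inverted value->field-bitmask dictionary once, represents each column's candidates as a single integer bitmask, tests singletons with bit_count and clears assigned fields by bulk bitwise AND/OR, with a progress flag that also bounds the sweeps (A's while-True spins forever on unresolvable inputs).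
import Mathlib
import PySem

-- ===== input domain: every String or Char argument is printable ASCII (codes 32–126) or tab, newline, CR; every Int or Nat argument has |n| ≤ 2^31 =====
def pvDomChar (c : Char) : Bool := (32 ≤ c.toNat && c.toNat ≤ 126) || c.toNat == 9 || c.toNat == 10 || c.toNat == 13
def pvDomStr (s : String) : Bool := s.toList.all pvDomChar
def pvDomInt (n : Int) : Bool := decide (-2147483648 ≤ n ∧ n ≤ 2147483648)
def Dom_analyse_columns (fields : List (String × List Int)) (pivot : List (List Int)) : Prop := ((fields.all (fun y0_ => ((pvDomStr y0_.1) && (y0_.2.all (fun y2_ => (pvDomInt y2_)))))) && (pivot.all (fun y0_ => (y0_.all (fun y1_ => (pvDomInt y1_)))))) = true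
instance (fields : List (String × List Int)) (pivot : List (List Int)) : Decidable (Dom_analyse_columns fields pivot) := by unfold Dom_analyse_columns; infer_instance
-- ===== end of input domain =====

-- B replaces A's repeated re-filtering of per-column candidate name lists with an
-- inverted value->field-bitmask index built once and per-column integer bitmasks
-- cleared by bulk bitwise operations (objective: alternative).


-- ===== PORT A =====
-- One pass of A's inner `for colnr, candidate_list in enumerate(...)` loop:
-- re-filter each stored candidate list against the assignment dict; a singleton
-- assigns its field (ticket_fields[...] = colnr) and is popped to [].
def pvPassA : List (List String) → PySem.Dict String Int → Nat → List (List String) × PySem.Dict String Int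
  | [], t, _ => ([], t)
  | l :: rest, t, ix =>
    let adj := l.filter (fun c => t.getD c 0 == -1)
    if adj.length == 1 then
      let out := pvPassA rest (t.insert (adj.headD "") (Int.ofNat ix)) (ix + 1)
      (adj.drop 1 :: out.1, out.2)
    else
      let out := pvPassA rest t (ix + 1)
      (adj :: out.1, out.2)

-- A's `while True` loop, totalised by fuel (#fields + 1 passes).  Wherever
-- Python A terminates it breaks within that many passes (every pass before the
-- break assigns at least one field), so the port is exact there; where Python A
-- loops forever, further passes no longer change the dict the port returns.
def pvLoopA : Nat → List (List String) → PySem.Dict String Int → PySem.Dict String Int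
  | 0, _, t => t
  | fuel + 1, cands, t =>
    if t.values.all (fun v => !(v == -1)) then t
    else
      let p := pvPassA cands t 0
      pvLoopA fuel p.1 p.2

def analyse_columns (fields : List (String × List Int)) (pivot : List (List Int)) : List (String × Int) :=
  let fd := PySem.Dict.ofList fields
  let ticket0 : PySem.Dict String Int := PySem.Dict.ofList (fd.items.map (fun p => (p.1, (-1 : Int))))
  let cands := pivot.map (fun column =>
    (fd.items.filter (fun p => column.all (fun x => p.2.contains x))).map Prod.fst)
  (pvLoopA (fd.size + 1) cands ticket0).items

-- ===== PORT B =====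
-- Python's `int.bit_count()` on a nonnegative int, ported by binary recursion (exact on Nat).
def pvPopcount : Nat → Nat
  | 0 => 0
  | m + 1 => (m + 1) % 2 + pvPopcount ((m + 1) / 2)
  decreasing_by exact Nat.div_lt_self (Nat.succ_pos m) one_lt_two

-- Source B's inner `for v in vals: vmask[v] = vmask.get(v, 0) | bit`
def pvVmaskAdd (d : PySem.Dict Int Nat) (bit : Nat) (vals : List Int) : PySem.Dict Int Nat :=
  vals.foldl (fun d v => d.insert v (d.getD v 0 ||| bit)) d

-- Source B's `for i, vals in enumerate(fields.values()): ...` building the inverted index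
def pvVmask (items : List (String × List Int)) : PySem.Dict Int Nat :=
  items.zipIdx.foldl (fun d p => pvVmaskAdd d (1 <<< p.2) p.1.2) PySem.Dict.empty

-- Source B's `m = full; for x in column: m &= vmask.get(x, 0)`
def pvColMask (vm : PySem.Dict Int Nat) (full : Nat) (column : List Int) : Nat :=
  column.foldl (fun m x => m &&& vm.getD x 0) full

-- One sweep of Source B's `for ix in range(len(masks))`: store r = masks[ix] & (full ^ done);
-- if r has exactly one bit, record pos[bit] = ix, set the bit in done, zero the stored mask.
-- (`r.bit_length() - 1` on a one-bit r is its exponent, ported as Nat.log2;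
-- `pos[i] = ix` is ported as List.set — i < len(pos) whenever r ≤ full.)
def pvPassB : List Nat → Nat → Nat → List Int → Nat → Bool → List Nat × Nat × List Int × Bool
  | [], _, done, pos, _, prog => ([], done, pos, prog)
  | m :: rest, full, done, pos, ix, prog =>
    let r := m &&& (full ^^^ done)
    if pvPopcount r == 1 then
      let out := pvPassB rest full (done ||| r) (pos.set (Nat.log2 r) (Int.ofNat ix)) (ix + 1) true
      (0 :: out.1, out.2)
    else
      let out := pvPassB rest full done pos (ix + 1) prog
      (r :: out.1, out.2)

-- Source B's `while done != full` loop with its no-progress break; totalised by fuel,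
-- which Source B's progress flag makes sufficient on every input.
def pvLoopB : Nat → List Nat → Nat → Nat → List Int → List Int
  | 0, _, _, _, pos => pos
  | fuel + 1, masks, full, done, pos =>
    if done = full then pos
    else
      let p := pvPassB masks full done pos 0 false
      if p.2.2.2 then pvLoopB fuel p.1 full p.2.1 p.2.2.1 else p.2.2.1

def analyse_columns_alt (fields : List (String × List Int)) (pivot : List (List Int)) : List (String × Int) :=
  let fd := PySem.Dict.ofList fields
  let names := fd.keys
  let n := names.length
  let vm := pvVmask fd.items
  let full := (1 <<< n) - 1
  let masks := pivot.map (fun column => pvColMask vm full column)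
  let pos := pvLoopB (n + 1) masks full 0 (List.replicate n (-1 : Int))
  names.zipIdx.map (fun p => (p.1, pos.getD p.2 0))

-- ===== PRECONDITION & SPEC =====
-- No Pre_: the fuel-totalised ports agree on every input.  (On inputs where the
-- singleton elimination gets stuck, Python A's `while True` loop never returns;
-- the port then returns the stalled assignment dict, which is also what B returns.)
def Spec_analyse_columns (fields : List (String × List Int)) (pivot : List (List Int)) (out : List (String × Int)) : Prop := out = analyse_columns_alt fields pivot
instance (fields : List (String × List Int)) (pivot : List (List Int)) (out : List (String × Int)) : Decidable (Spec_analyse_columns fields pivot out) := by unfold Spec_analyse_columns; infer_instance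

-- ===== CLAIM (what is proved, stated in full; the proofs are below) =====
def Claim_equal_analyse_columns : Prop := ∀ (fields : List (String × List Int)) (pivot : List (List Int)), Dom_analyse_columns fields pivot → Spec_analyse_columns fields pivot (analyse_columns fields pivot)

-- ===== LEMMAS AND PROOFS =====

-- "field c is still unassigned in ticket dict t"
def pvU (t : PySem.Dict String Int) (c : String) : Bool := t.getD c 0 == -1

-- the names selected by the bits of a mask, starting at bit position k
def pvML : List String → Nat → Nat → List String
  | [], _, _ => []
  | a :: t, m, k => if m.testBit k then a :: pvML t m (k + 1) else pvML t m (k + 1)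

-- the relation between A's stored candidate list and B's column bitmask
def pvRel (names : List String) (a : List String) (m : Nat) : Prop :=
  a = pvML names m 0 ∧ m < 2 ^ names.length

lemma pvBitHigh {x n i : Nat} (hx : x < 2 ^ n) (hi : n ≤ i) : x.testBit i = false := by
  by_contra hb
  have hb' : x.testBit i = true := by simpa using hb
  have h1 : 2 ^ i ≤ x := Nat.ge_two_pow_of_testBit hb'
  have h2 : 2 ^ n ≤ 2 ^ i := Nat.pow_le_pow_right (by norm_num) hi
  omega

lemma pvPopcount_eq : ∀ (n m : Nat), m < 2 ^ n → pvPopcount m = (List.range n).countP m.testBit := by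
  intro n
  induction n with
  | zero =>
    intro m hm
    interval_cases m
    simp [pvPopcount]
  | succ n ih =>
    intro m hm
    cases m with
    | zero =>
      rw [pvPopcount]
      rw [List.countP_eq_zero.mpr (by intro i _; simp [Nat.zero_testBit])]
    | succ m' =>
      rw [pvPopcount]
      have hdiv : (m' + 1) / 2 < 2 ^ n := by
        have : m' + 1 < 2 ^ (n + 1) := hm
        omega
      rw [ih _ hdiv, List.range_succ_eq_map, List.countP_cons, List.countP_map]
      have hz : ((m' + 1).testBit 0 = true) ↔ (m' + 1) % 2 = 1 := by
        rw [Nat.testBit_zero]; simp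
      have hs : (Nat.testBit (m' + 1) ∘ Nat.succ) = ((m' + 1) / 2).testBit := by
        funext i
        simp [Function.comp, Nat.testBit_succ]
      rw [hs]
      by_cases hp : (m' + 1) % 2 = 1
      · simp [hp, hz.mpr hp]
        omega
      · have hp0 : (m' + 1) % 2 = 0 := by omega
        have : (m' + 1).testBit 0 = false := by
          rw [Nat.testBit_zero]; simp [hp0]
        simp [hp0, this]

lemma pvML_length : ∀ (names : List String) (m k : Nat),
    (pvML names m k).length = (List.range names.length).countP (fun j => m.testBit (k + j)) := by
  intro names
  induction names with
  | nil => intro m k; simp [pvML]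
  | cons a t ih =>
    intro m k
    have hshift : (fun j => m.testBit (k + j)) ∘ Nat.succ = fun j => m.testBit (k + 1 + j) := by
      funext j
      have he : k + (j + 1) = k + 1 + j := by omega
      simp [Function.comp, he]
    rw [pvML, List.length_cons, List.range_succ_eq_map, List.countP_cons, List.countP_map,
      hshift, ← ih m (k + 1)]
    by_cases hb : m.testBit k <;> simp [hb]

lemma pvML_len_popcount (names : List String) (m : Nat) (hm : m < 2 ^ names.length) :
    (pvML names m 0).length = pvPopcount m := by
  rw [pvML_length, pvPopcount_eq names.length m hm]
  congr 1
  funext j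
  simp

lemma pvML_zero : ∀ (names : List String) (k : Nat), pvML names 0 k = [] := by
  intro names
  induction names with
  | nil => intro k; rfl
  | cons a t ih => intro k; simp [pvML, Nat.zero_testBit, ih]

lemma pvML_filter (p : String → Bool) :
    ∀ (names : List String) (m m' k : Nat),
      (∀ j (hj : j < names.length), m'.testBit (k + j) = (m.testBit (k + j) && p names[j])) →
      (pvML names m k).filter p = pvML names m' k := by
  intro names
  induction names with
  | nil => intro m m' k _; rfl
  | cons a t ih =>
    intro m m' k h
    have h0 : m'.testBit k = (m.testBit k && p a) := by
      have := h 0 (by simp)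
      simpa using this
    have h' : ∀ j (hj : j < t.length), m'.testBit (k + 1 + j) = (m.testBit (k + 1 + j) && p t[j]) := by
      intro j hj
      have := h (j + 1) (by simpa using Nat.succ_lt_succ hj)
      rw [show k + (j + 1) = k + 1 + j by omega] at this
      simpa using this
    rw [pvML, pvML, h0]
    by_cases hb : m.testBit k
    · by_cases hp : p a
      · rw [if_pos hb, List.filter_cons, if_pos (by simp [hp]), if_pos (by simp [hb, hp])]
        rw [ih m m' (k + 1) h']
      · rw [if_pos hb, List.filter_cons, if_neg (by simp [hp]), if_neg (by simp [hb, hp])]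
        rw [ih m m' (k + 1) h']
    · rw [if_neg (by simp [hb]), if_neg (by simp [hb])]
      exact ih m m' (k + 1) h'

lemma pvML_nil : ∀ (names : List String) (r k : Nat), pvML names r k = [] →
    ∀ j (hj : j < names.length), r.testBit (k + j) = false := by
  intro names
  induction names with
  | nil => intro r k _ j hj; simp at hj
  | cons a t ih =>
    intro r k hml j hj
    rw [pvML] at hml
    by_cases hb : r.testBit k
    · simp [hb] at hml
    · simp only [hb, if_false] at hml
      cases j with
      | zero => simpa using hb
      | succ j' =>
        have := ih r (k + 1) hml j' (by simpa using Nat.lt_of_succ_lt_succ hj)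
        rw [show k + (j' + 1) = k + 1 + j' by omega]
        simpa using this

lemma pvML_single : ∀ (names : List String) (r k : Nat) (f : String), pvML names r k = [f] →
    ∃ i0, ∃ h : i0 < names.length, names[i0] = f ∧ r.testBit (k + i0) = true ∧
      (∀ j (hj : j < names.length), r.testBit (k + j) = true → j = i0) := by
  intro names
  induction names with
  | nil => intro r k f h; simp [pvML] at h
  | cons a t ih =>
    intro r k f hml
    rw [pvML] at hml
    by_cases hb : r.testBit k
    · simp only [hb, if_true, List.cons.injEq] at hml
      obtain ⟨rfl, hnil⟩ := hml
      refine ⟨0, by simp, by simp, by simpa using hb, ?_⟩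
      intro j hj hbit
      cases j with
      | zero => rfl
      | succ j' =>
        have := pvML_nil t r (k + 1) hnil j' (by simpa using Nat.lt_of_succ_lt_succ hj)
        rw [show k + (j' + 1) = k + 1 + j' by omega] at hbit
        rw [this] at hbit
        exact absurd hbit (by simp)
    · simp only [hb, if_false] at hml
      obtain ⟨i0, hi0, hname, hbit, huniq⟩ := ih r (k + 1) f hml
      refine ⟨i0 + 1, by simpa using Nat.succ_lt_succ hi0, by simpa using hname, ?_, ?_⟩
      · rw [show k + (i0 + 1) = k + 1 + i0 by omega]
        exact hbit
      · intro j hj hbitj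
        cases j with
        | zero => simp at hbitj; exact absurd hbitj hb
        | succ j' =>
          rw [show k + (j' + 1) = k + 1 + j' by omega] at hbitj
          exact congrArg Nat.succ (huniq j' (by simpa using Nat.lt_of_succ_lt_succ hj) hbitj)

-- updating one key of a zip-shaped items list = List.set on the value column
lemma pvZipMap : ∀ (names : List String) (pos : List Int) (i0 : Nat) (f : String) (v : Int),
    names.Nodup → pos.length = names.length → ∀ (h : i0 < names.length), names[i0] = f →
    (names.zip pos).map (fun p => if p.1 == f then (f, v) else p) = names.zip (pos.set i0 v) := by
  intro names
  induction names with
  | nil => intro pos i0 f v _ _ h _; simp at h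
  | cons a t ih =>
    intro pos i0 f v hnd hlen h hname
    cases pos with
    | nil => simp at hlen
    | cons p0 pt =>
      have hnd' := List.nodup_cons.mp hnd
      cases i0 with
      | zero =>
        have haf : a = f := by simpa using hname
        subst haf
        simp only [List.zip_cons_cons, List.map_cons, BEq.rfl, if_true, List.set_cons_zero]
        congr 1
        have : ∀ q ∈ t.zip pt, (fun p => if p.1 == a then (a, v) else p) q = q := by
          intro q hq
          have hq1 : q.1 ∈ t := (List.of_mem_zip hq).1
          have : q.1 ≠ a := fun he => hnd'.1 (he ▸ hq1)
          simp [this]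
        exact (List.map_congr_left this).trans (List.map_id _)
      | succ i0' =>
        have hlt' : i0' < t.length := by
          have hx := h
          simp only [List.length_cons] at hx
          omega
        have hname' : t[i0'] = f := by simpa using hname
        have hmemf : f ∈ t := by rw [← hname']; exact List.getElem_mem hlt'
        have haf : a ≠ f := fun he => hnd'.1 (he ▸ hmemf)
        simp only [List.zip_cons_cons, List.map_cons, List.set_cons_succ]
        rw [if_neg (by simpa using haf)]
        congr 1
        exact ih pt i0' f v hnd'.2 (by simpa using hlen) (by simpa using Nat.lt_of_succ_lt_succ h) hname'

lemma pvKeys_eq {t : PySem.Dict String Int} {names : List String} {pos : List Int}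
    (hit : t.items = names.zip pos) (hlen : pos.length = names.length) : t.keys = names := by
  show t.items.map Prod.fst = names
  rw [hit]
  exact List.map_fst_zip (le_of_eq hlen.symm)

lemma pvInsertZip {t : PySem.Dict String Int} {names : List String} {pos : List Int}
    (hnd : names.Nodup) (hit : t.items = names.zip pos) (hlen : pos.length = names.length)
    {i0 : Nat} (h : i0 < names.length) {f : String} (hname : names[i0] = f) (v : Int) :
    (t.insert f v).items = names.zip (pos.set i0 v) := by
  have hkeys : t.keys = names := pvKeys_eq hit hlen
  have hcont : t.contains f = true := by
    rw [PySem.Dict.contains_eq_decide_mem_keys, hkeys]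
    simp only [decide_eq_true_eq]
    rw [← hname]
    exact List.getElem_mem _
  rw [PySem.Dict.items_insert_of_contains t _ hcont, hit]
  exact pvZipMap names pos i0 f v hnd hlen h hname

lemma pvGetD_idx {t : PySem.Dict String Int} {names : List String} {pos : List Int}
    (hnd : names.Nodup) (hit : t.items = names.zip pos) (hlen : pos.length = names.length)
    {j : Nat} (hj : j < names.length) : t.getD names[j] 0 = pos.getD j 0 := by
  have hjz : j < (names.zip pos).length := by
    rw [List.length_zip]; omega
  have hmem : (names[j], pos[j]'(by omega)) ∈ t.items := by
    rw [hit]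
    have hg : (names.zip pos)[j] = (names[j], pos[j]'(by omega)) := List.getElem_zip
    rw [← hg]
    exact List.getElem_mem _
  have hknd : t.keys.Nodup := by rw [pvKeys_eq hit hlen]; exact hnd
  rw [PySem.Dict.getD_of_mem_items t hmem hknd 0, List.getD_eq_getElem?_getD,
    List.getElem?_eq_getElem (show j < pos.length by omega)]
  rfl

lemma pvVmaskAdd_getD (b : Nat) (x : Int) : ∀ (vals : List Int) (d : PySem.Dict Int Nat),
    (pvVmaskAdd d b vals).getD x 0 = if vals.contains x then d.getD x 0 ||| b else d.getD x 0 := by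
  intro vals
  induction vals with
  | nil => intro d; simp [pvVmaskAdd]
  | cons v rest ih =>
    intro d
    show (pvVmaskAdd (d.insert v (d.getD v 0 ||| b)) b rest).getD x 0 = _
    rw [ih, List.contains_cons]
    by_cases hxv : x = v
    · subst hxv
      rw [PySem.Dict.getD_insert_self]
      simp only [beq_self_eq_true, Bool.true_or, if_true]
      by_cases hr : rest.contains x
      · rw [if_pos hr, Nat.or_assoc, Nat.or_self]
      · rw [if_neg hr]
    · rw [PySem.Dict.getD_insert_of_ne d _ _ hxv]
      have hbx : (x == v) = false := by simpa using hxv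
      rw [hbx, Bool.false_or]

lemma pvVmask_bit_low (x : Int) : ∀ (l : List (String × List Int)) (k : Nat) (d : PySem.Dict Int Nat)
    (i : Nat), i < k →
    (((l.zipIdx k).foldl (fun d p => pvVmaskAdd d (1 <<< p.2) p.1.2) d).getD x 0).testBit i
      = ((d.getD x 0).testBit i) := by
  intro l
  induction l with
  | nil => intro k d i _; rfl
  | cons a t ih =>
    intro k d i hik
    rw [List.zipIdx_cons, List.foldl_cons]
    rw [ih (k + 1) _ i (by omega)]
    rw [pvVmaskAdd_getD]
    split
    · rw [Nat.testBit_or]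
      have : (1 <<< k).testBit i = false := by
        rw [Nat.shiftLeft_eq, one_mul, Nat.testBit_two_pow]
        simp
        omega
      simp [this]
    · rfl

lemma pvVmask_bit (x : Int) : ∀ (l : List (String × List Int)) (k : Nat) (d : PySem.Dict Int Nat)
    (i : Nat) (hi : i < l.length),
    (((l.zipIdx k).foldl (fun d p => pvVmaskAdd d (1 <<< p.2) p.1.2) d).getD x 0).testBit (k + i)
      = ((d.getD x 0).testBit (k + i) || l[i].2.contains x) := by
  intro l
  induction l with
  | nil => intro k d i hi; simp at hi
  | cons a t ih =>
    intro k d i hi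
    rw [List.zipIdx_cons, List.foldl_cons]
    have hone : ∀ j, (1 <<< k).testBit j = decide (k = j) := by
      intro j
      rw [Nat.shiftLeft_eq, one_mul, Nat.testBit_two_pow]
    cases i with
    | zero =>
      simp only [Nat.add_zero, List.getElem_cons_zero]
      rw [pvVmask_bit_low x t (k + 1) _ k (by omega), pvVmaskAdd_getD]
      by_cases hcont : a.2.contains x
      · rw [if_pos hcont, Nat.testBit_or, hone k, hcont]
        simp
      · have hcf : a.2.contains x = false := by simpa using hcont
        rw [if_neg hcont, hcf, Bool.or_false]
    | succ i' =>
      have hlt' : i' < t.length := by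
        simp only [List.length_cons] at hi
        omega
      have hstep := ih (k + 1) (pvVmaskAdd d (1 <<< k) a.2) i' hlt'
      rw [show k + (i' + 1) = k + 1 + i' by omega, List.getElem_cons_succ, hstep, pvVmaskAdd_getD]
      congr 1
      by_cases hcont : a.2.contains x
      · rw [if_pos hcont, Nat.testBit_or, hone]
        have : decide (k = k + 1 + i') = false := by simp; omega
        rw [this, Bool.or_false]
      · rw [if_neg hcont]

lemma pvColMask_bit (vm : PySem.Dict Int Nat) (i : Nat) : ∀ (column : List Int) (acc : Nat),
    (pvColMask vm acc column).testBit i = (acc.testBit i && column.all (fun x => (vm.getD x 0).testBit i)) := by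
  intro column
  induction column with
  | nil => intro acc; simp [pvColMask]
  | cons x rest ih =>
    intro acc
    show (pvColMask vm (acc &&& vm.getD x 0) rest).testBit i = _
    rw [ih, Nat.testBit_and, List.all_cons]
    rw [Bool.and_assoc]

lemma pvColMask_lt {n : Nat} (vm : PySem.Dict Int Nat) : ∀ (column : List Int) (acc : Nat),
    acc < 2 ^ n → pvColMask vm acc column < 2 ^ n := by
  intro column
  induction column with
  | nil => intro acc h; exact h
  | cons x rest ih =>
    intro acc h
    show pvColMask vm (acc &&& vm.getD x 0) rest < 2 ^ n
    exact ih _ (by rw [Nat.and_comm]; exact Nat.and_lt_two_pow _ h)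

-- A's initial candidate list for a column = the names selected by a mask whose bits
-- are the per-field "column ⊆ field values" tests
lemma pvML_init (column : List Int) : ∀ (l : List (String × List Int)) (M : Nat) (k : Nat),
    (∀ j (hj : j < l.length), M.testBit (k + j) = column.all (fun x => (l[j]).2.contains x)) →
    (l.filter (fun p => column.all (fun x => p.2.contains x))).map Prod.fst = pvML (l.map Prod.fst) M k := by
  intro l
  induction l with
  | nil => intro M k _; rfl
  | cons a t ih =>
    intro M k h
    have h0 : M.testBit k = column.all (fun x => a.2.contains x) := by
      have := h 0 (by simp)
      simpa using this
    have h' : ∀ j (hj : j < t.length), M.testBit (k + 1 + j) = column.all (fun x => (t[j]).2.contains x) := by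
      intro j hj
      have := h (j + 1) (by simpa using Nat.succ_lt_succ hj)
      rw [show k + (j + 1) = k + 1 + j by omega] at this
      simpa using this
    rw [List.map_cons, pvML, h0, List.filter_cons]
    by_cases hp : column.all (fun x => a.2.contains x)
    · simp only [hp, if_true, List.map_cons]
      rw [ih M (k + 1) h']
    · simp only [hp, Bool.false_eq_true, if_false]
      rw [ih M (k + 1) h']

lemma pvT0_items (fd : PySem.Dict String (List Int)) (hnd : fd.keys.Nodup) :
    (PySem.Dict.ofList (fd.items.map (fun p => (p.1, (-1 : Int))))).items
      = fd.items.map (fun p => (p.1, (-1 : Int))) := by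
  have hnd' : ((fd.items.map (fun p => (p.1, (-1 : Int)))).map Prod.fst).Nodup := by
    rw [List.map_map]
    exact hnd
  have := PySem.Dict.items_foldl_insert_fresh (fd.items.map (fun p => (p.1, (-1 : Int))))
    Prod.fst Prod.snd PySem.Dict.empty (fun a _ => PySem.Dict.contains_empty _) hnd'
  simpa [PySem.Dict.ofList, PySem.Dict.update] using this

lemma pvMapConstZip {α β : Type} (c : β) : ∀ (l : List (α × List Int)),
    l.map (fun p => (p.1, c)) = (l.map Prod.fst).zip (List.replicate l.length c) := by
  intro l
  induction l with
  | nil => rfl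
  | cons a t ih => simp [List.replicate_succ, ih]

lemma pvPassA_stuck (t : PySem.Dict String Int) :
    ∀ (L : List (List String)) (ix : Nat),
      (∀ s ∈ L, s.filter (pvU t) = s ∧ s.length ≠ 1) → pvPassA L t ix = (L, t) := by
  intro L
  induction L with
  | nil => intro ix _; simp [pvPassA]
  | cons s L ih =>
    intro ix h
    have hs := h s (List.mem_cons_self ..)
    have hlen : (s.length == 1) = false := by simpa using hs.2
    have hfil : List.filter (fun c => t.getD c 0 == -1) s = s := hs.1
    simp only [pvPassA, hfil, hlen, Bool.false_eq_true, if_false,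
      ih (ix + 1) (fun u hu => h u (List.mem_cons_of_mem _ hu))]

lemma pvLoopA_stuck (t : PySem.Dict String Int) (L : List (List String))
    (h : ∀ s ∈ L, s.filter (pvU t) = s ∧ s.length ≠ 1) :
    ∀ fuel, pvLoopA fuel L t = t := by
  intro fuel
  induction fuel with
  | zero => rfl
  | succ n ih =>
    rw [pvLoopA]
    split
    · rfl
    · rw [pvPassA_stuck t L 0 h]
      exact ih

lemma pvPass_bisim (names : List String) (hnd : names.Nodup) :
    ∀ (SA : List (List String)) (MB : List Nat) (t : PySem.Dict String Int)
      (done : Nat) (pos : List Int) (ix : Nat) (prog : Bool),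
      List.Forall₂ (pvRel names) SA MB →
      t.items = names.zip pos → pos.length = names.length →
      done < 2 ^ names.length →
      (∀ j (hj : j < names.length), done.testBit j = !(pos.getD j 0 == -1)) →
      (pvPassA SA t ix).2.items = names.zip (pvPassB MB (2 ^ names.length - 1) done pos ix prog).2.2.1 ∧
      (pvPassB MB (2 ^ names.length - 1) done pos ix prog).2.2.1.length = names.length ∧
      (pvPassB MB (2 ^ names.length - 1) done pos ix prog).2.1 < 2 ^ names.length ∧
      (∀ j (hj : j < names.length),
        (pvPassB MB (2 ^ names.length - 1) done pos ix prog).2.1.testBit j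
          = !((pvPassB MB (2 ^ names.length - 1) done pos ix prog).2.2.1.getD j 0 == -1)) ∧
      List.Forall₂ (pvRel names) (pvPassA SA t ix).1 (pvPassB MB (2 ^ names.length - 1) done pos ix prog).1 ∧
      (prog = true → (pvPassB MB (2 ^ names.length - 1) done pos ix prog).2.2.2 = true) ∧
      ((pvPassB MB (2 ^ names.length - 1) done pos ix prog).2.2.2 = false →
        (pvPassA SA t ix).2 = t ∧
        (pvPassB MB (2 ^ names.length - 1) done pos ix prog).2.2.1 = pos ∧
        (pvPassB MB (2 ^ names.length - 1) done pos ix prog).2.1 = done ∧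
        (∀ s ∈ (pvPassA SA t ix).1, s.filter (pvU t) = s ∧ s.length ≠ 1)) := by
  intro SA
  induction SA with
  | nil =>
    intro MB t done pos ix prog hF hit hlen hdlt hdone
    cases hF
    exact ⟨hit, hlen, hdlt, hdone, List.Forall₂.nil, fun h => h, fun _ =>
      ⟨rfl, rfl, rfl, by intro s hs; simp [pvPassA] at hs⟩⟩
  | cons a SA ih =>
    intro MB t done pos ix prog hF hit hlen hdlt hdone
    cases hF with
    | cons hab hF' =>
      rename_i m MB'
      obtain ⟨ha, hmlt⟩ := hab
      have hfull : (2 ^ names.length - 1) < 2 ^ names.length :=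
        Nat.sub_lt (Nat.two_pow_pos _) (by norm_num)
      have hult : (2 ^ names.length - 1) ^^^ done < 2 ^ names.length := Nat.xor_lt_two_pow hfull hdlt
      have hrlt : m &&& ((2 ^ names.length - 1) ^^^ done) < 2 ^ names.length :=
        Nat.and_lt_two_pow _ hult
      -- refiltering any selected-name list = intersecting its mask with (full ^ done)
      have hfilter : ∀ m0 : Nat, (pvML names m0 0).filter (fun c => t.getD c 0 == -1)
          = pvML names (m0 &&& ((2 ^ names.length - 1) ^^^ done)) 0 := by
        intro m0
        apply pvML_filter
        intro j hj
        rw [Nat.testBit_and, Nat.testBit_xor, Nat.testBit_two_pow_sub_one]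
        have hU : (t.getD names[j] 0 == -1) = !done.testBit j := by
          rw [pvGetD_idx hnd hit hlen hj, ← Bool.not_not (pos.getD j 0 == -1), ← hdone j hj]
        simp only [Nat.zero_add] at *
        rw [hU]
        simp [hj]
      have hfilA : a.filter (fun c => t.getD c 0 == -1)
          = pvML names (m &&& ((2 ^ names.length - 1) ^^^ done)) 0 := by
        rw [ha]
        exact hfilter m
      have hlenpc : (pvML names (m &&& ((2 ^ names.length - 1) ^^^ done)) 0).length
          = pvPopcount (m &&& ((2 ^ names.length - 1) ^^^ done)) :=
        pvML_len_popcount names _ hrlt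
      by_cases hc : pvPopcount (m &&& ((2 ^ names.length - 1) ^^^ done)) = 1
      · -- singleton: both sides assign
        obtain ⟨f, hf⟩ : ∃ f, pvML names (m &&& ((2 ^ names.length - 1) ^^^ done)) 0 = [f] :=
          List.length_eq_one_iff.mp (by rw [hlenpc]; exact hc)
        obtain ⟨i0, hi0, hname, hbit, huniq⟩ := pvML_single names _ 0 f hf
        have hr2 : m &&& ((2 ^ names.length - 1) ^^^ done) = 2 ^ i0 := by
          apply Nat.eq_of_testBit_eq
          intro j
          rw [Nat.testBit_two_pow]
          by_cases hjn : j < names.length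
          · by_cases hji : j = i0
            · subst hji
              simp only [Nat.zero_add] at hbit
              simp [hbit]
            · have : (m &&& ((2 ^ names.length - 1) ^^^ done)).testBit j = false := by
                by_contra hcon
                have : (m &&& ((2 ^ names.length - 1) ^^^ done)).testBit (0 + j) = true := by
                  simpa using hcon
                exact hji (huniq j hjn this)
              simp [this, Ne.symm hji]
          · rw [pvBitHigh hrlt (by omega)]
            have : i0 ≠ j := by omega
            simp [this]
        have hlog : Nat.log2 (m &&& ((2 ^ names.length - 1) ^^^ done)) = i0 := by
          rw [hr2]; exact Nat.log2_two_pow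
        have hposj : pos.getD i0 0 = -1 := by
          have hu := hdone i0 hi0
          have : done.testBit i0 = false := by
            have hx : ((2 ^ names.length - 1) ^^^ done).testBit i0 = true := by
              have hb2 := hbit
              simp only [Nat.zero_add, Nat.testBit_and] at hb2
              exact ((Bool.and_eq_true _ _).mp hb2).2
            rw [Nat.testBit_xor, Nat.testBit_two_pow_sub_one] at hx
            simp [hi0] at hx
            simpa using hx
          rw [this] at hu
          have := hu.symm
          simpa using this
        -- new-state invariants
        have hit' : (t.insert f (Int.ofNat ix)).items = names.zip (pos.set i0 (Int.ofNat ix)) :=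
          pvInsertZip hnd hit hlen hi0 hname _
        have hlen' : (pos.set i0 (Int.ofNat ix)).length = names.length := by
          rw [List.length_set]; exact hlen
        have hdlt' : done ||| (m &&& ((2 ^ names.length - 1) ^^^ done)) < 2 ^ names.length :=
          Nat.or_lt_two_pow hdlt hrlt
        have hdone' : ∀ j (hj : j < names.length),
            (done ||| (m &&& ((2 ^ names.length - 1) ^^^ done))).testBit j
              = !((pos.set i0 (Int.ofNat ix)).getD j 0 == -1) := by
          intro j hj
          rw [Nat.testBit_or, hr2, Nat.testBit_two_pow]
          by_cases hji : j = i0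
          · subst hji
            have hget : (pos.set j (Int.ofNat ix)).getD j 0 = Int.ofNat ix := by
              rw [List.getD_eq_getElem?_getD]
              have : j < pos.length := by omega
              simp [this]
            rw [hget]
            have : (Int.ofNat ix == -1) = false := by
              rw [beq_eq_false_iff_ne]
              intro hcon
              have hnn : (0 : Int) ≤ Int.ofNat ix := Int.ofNat_nonneg ix
              rw [hcon] at hnn
              norm_num at hnn
            simp [this]
          · have hget : (pos.set i0 (Int.ofNat ix)).getD j 0 = pos.getD j 0 := by
              rw [List.getD_eq_getElem?_getD, List.getD_eq_getElem?_getD,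
                List.getElem?_set_ne (by omega)]
            rw [hget, hdone j hj]
            simp [Ne.symm hji]
        have IH := ih MB' (t.insert f (Int.ofNat ix))
          (done ||| (m &&& ((2 ^ names.length - 1) ^^^ done)))
          (pos.set i0 (Int.ofNat ix)) (ix + 1) true hF' hit' hlen' hdlt' hdone'
        have hcA : ((pvML names (m &&& ((2 ^ names.length - 1) ^^^ done)) 0).length == 1) = true := by
          rw [hf]; rfl
        have hcB : (pvPopcount (m &&& ((2 ^ names.length - 1) ^^^ done)) == 1) = true := by
          simpa using hc
        rw [pvPassA, pvPassB]
        simp only [hfilA]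
        rw [if_pos hcA, if_pos hcB]
        simp only [hf, List.headD_cons, List.drop_succ_cons, List.drop_zero, hlog]
        refine ⟨IH.1, IH.2.1, IH.2.2.1, IH.2.2.2.1, ?_, ?_, ?_⟩
        · exact List.Forall₂.cons ⟨(pvML_zero names 0).symm, Nat.two_pow_pos _⟩
            IH.2.2.2.2.1
        · intro _
          exact IH.2.2.2.2.2.1 rfl
        · intro hfalse
          exact absurd (IH.2.2.2.2.2.1 rfl) (by rw [hfalse]; simp)
      · -- no singleton: both sides pass through, storing r
        have hcA : ¬(((pvML names (m &&& ((2 ^ names.length - 1) ^^^ done)) 0).length == 1) = true) := by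
          rw [hlenpc]
          simpa using hc
        have hcB : ¬((pvPopcount (m &&& ((2 ^ names.length - 1) ^^^ done)) == 1) = true) := by
          simpa using hc
        have IH := ih MB' t done pos (ix + 1) prog hF' hit hlen hdlt hdone
        rw [pvPassA, pvPassB]
        simp only [hfilA]
        rw [if_neg hcA, if_neg hcB]
        refine ⟨IH.1, IH.2.1, IH.2.2.1, IH.2.2.2.1, ?_, IH.2.2.2.2.2.1, ?_⟩
        · exact List.Forall₂.cons ⟨rfl, hrlt⟩ IH.2.2.2.2.1
        · intro hfalse
          obtain ⟨ht, hp, hd, hst⟩ := IH.2.2.2.2.2.2 hfalse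
          refine ⟨ht, hp, hd, ?_⟩
          intro s hs
          rcases List.mem_cons.mp hs with rfl | hs'
          · constructor
            · show List.filter (fun c => t.getD c 0 == -1) _ = _
              rw [hfilter (m &&& ((2 ^ names.length - 1) ^^^ done)), Nat.and_assoc, Nat.and_self]
            · rw [hlenpc]
              exact hc
          · exact hst s hs'

lemma pvAllDone {t : PySem.Dict String Int} {names : List String} {pos : List Int} {done : Nat}
    (hit : t.items = names.zip pos) (hlen : pos.length = names.length)
    (hdlt : done < 2 ^ names.length)
    (hdone : ∀ j (hj : j < names.length), done.testBit j = !(pos.getD j 0 == -1)) :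
    (t.values.all (fun v => !(v == -1)) = true) ↔ done = 2 ^ names.length - 1 := by
  have hvals : t.values = pos := by
    show t.items.map Prod.snd = pos
    rw [hit]
    exact List.map_snd_zip (le_of_eq hlen)
  rw [hvals]
  constructor
  · intro hall
    apply Nat.eq_of_testBit_eq
    intro j
    rw [Nat.testBit_two_pow_sub_one]
    by_cases hj : j < names.length
    · rw [hdone j hj]
      have hjp : j < pos.length := by omega
      have := (List.all_eq_true.mp hall) pos[j] (List.getElem_mem _)
      rw [List.getD_eq_getElem?_getD, List.getElem?_eq_getElem hjp]
      simp only [Option.getD_some]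
      simp [hj]
      simpa using this
    · rw [pvBitHigh hdlt (by omega)]
      simp [hj]
  · intro hdf
    rw [List.all_eq_true]
    intro v hv
    obtain ⟨j, hjp, rfl⟩ := List.mem_iff_getElem.mp hv
    have hjn : j < names.length := by omega
    have := hdone j hjn
    rw [hdf, Nat.testBit_two_pow_sub_one] at this
    simp only [hjn, decide_true] at this
    rw [List.getD_eq_getElem?_getD, List.getElem?_eq_getElem hjp] at this
    simp only [Option.getD_some] at this
    simpa using this.symm

lemma pvLoop_bisim (names : List String) (hnd : names.Nodup) :
    ∀ (fuel : Nat) (SA : List (List String)) (MB : List Nat) (t : PySem.Dict String Int)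
      (done : Nat) (pos : List Int),
      List.Forall₂ (pvRel names) SA MB →
      t.items = names.zip pos → pos.length = names.length →
      done < 2 ^ names.length →
      (∀ j (hj : j < names.length), done.testBit j = !(pos.getD j 0 == -1)) →
      (pvLoopA fuel SA t).items = names.zip (pvLoopB fuel MB (2 ^ names.length - 1) done pos) ∧
      (pvLoopB fuel MB (2 ^ names.length - 1) done pos).length = names.length := by
  intro fuel
  induction fuel with
  | zero =>
    intro SA MB t done pos _ hit hlen _ _
    exact ⟨hit, hlen⟩
  | succ n ih =>
    intro SA MB t done pos hF hit hlen hdlt hdone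
    rw [pvLoopA, pvLoopB]
    by_cases htop : t.values.all (fun v => !(v == -1)) = true
    · have hdf : done = 2 ^ names.length - 1 := (pvAllDone hit hlen hdlt hdone).mp htop
      simp only [htop, if_true, hdf, if_pos rfl]
      exact ⟨hit, hlen⟩
    · have hdf : done ≠ 2 ^ names.length - 1 := fun h => htop ((pvAllDone hit hlen hdlt hdone).mpr h)
      simp only [htop, Bool.false_eq_true, if_false, if_neg hdf]
      have P := pvPass_bisim names hnd SA MB t done pos 0 false hF hit hlen hdlt hdone
      cases hprog : (pvPassB MB (2 ^ names.length - 1) done pos 0 false).2.2.2 with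
      | true =>
        simp only [hprog, if_true]
        exact ih _ _ _ _ _ P.2.2.2.2.1 P.1 P.2.1 P.2.2.1 P.2.2.2.1
      | false =>
        simp only [Bool.false_eq_true, if_false]
        obtain ⟨ht, hp, _, hst⟩ := P.2.2.2.2.2.2 hprog
        rw [hp]
        constructor
        · rw [ht]
          rw [pvLoopA_stuck t _ hst n]
          exact hit
        · exact hlen

lemma pvZipIdxMap : ∀ (names : List String) (pos : List Int) (k : Nat),
    pos.length = k + names.length →
    (names.zipIdx k).map (fun p => (p.1, pos.getD p.2 0)) = names.zip (pos.drop k) := by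
  intro names
  induction names with
  | nil => intro pos k _; simp
  | cons a t ih =>
    intro pos k hlen
    rw [List.zipIdx_cons, List.map_cons]
    have hk : k < pos.length := by simp at hlen; omega
    rw [List.drop_eq_getElem_cons hk, List.zip_cons_cons]
    congr 1
    · congr 1
      rw [List.getD_eq_getElem?_getD, List.getElem?_eq_getElem hk]
      rfl
    · rw [ih pos (k + 1) (by simp at hlen ⊢; omega)]

lemma pvMain (fields : List (String × List Int)) (pivot : List (List Int)) :
    analyse_columns fields pivot = analyse_columns_alt fields pivot := by
  rw [analyse_columns, analyse_columns_alt]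
  have hkeys : ((PySem.Dict.ofList fields).items.map Prod.fst).Nodup :=
    PySem.Dict.nodup_keys_ofList fields
  have hknames : (PySem.Dict.ofList fields).keys = (PySem.Dict.ofList fields).items.map Prod.fst := rfl
  simp only [hknames]
  set fd := PySem.Dict.ofList fields with hfd
  set names := fd.items.map Prod.fst with hnames
  have hnlen : names.length = fd.items.length := by rw [hnames, List.length_map]
  have hfull : (1 <<< names.length) - 1 = 2 ^ names.length - 1 := by
    rw [Nat.shiftLeft_eq, one_mul]
  rw [hfull]
  -- initial ticket dict = names zipped with (-1)s
  have ht0 : (PySem.Dict.ofList (fd.items.map (fun p => (p.1, (-1 : Int))))).items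
      = names.zip (List.replicate names.length (-1 : Int)) := by
    rw [pvT0_items fd hkeys, pvMapConstZip, hnlen]
  have hlen0 : (List.replicate names.length (-1 : Int)).length = names.length := by
    simp
  have hdlt0 : (0 : Nat) < 2 ^ names.length := Nat.two_pow_pos _
  have hdone0 : ∀ j (hj : j < names.length),
      (0 : Nat).testBit j = !((List.replicate names.length (-1 : Int)).getD j 0 == -1) := by
    intro j hj
    rw [Nat.zero_testBit, List.getD_eq_getElem?_getD]
    simp [hj]
  -- initial candidate masks relate to A's candidate lists
  have hF : List.Forall₂ (pvRel names)
      (pivot.map (fun column => (fd.items.filter (fun p => column.all (fun x => p.2.contains x))).map Prod.fst))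
      (pivot.map (fun column => pvColMask (pvVmask fd.items) (2 ^ names.length - 1) column)) := by
    rw [List.forall₂_map_left_iff, List.forall₂_map_right_iff, List.forall₂_same]
    intro column _
    constructor
    · apply pvML_init
      intro j hj
      have hjn : j < names.length := by omega
      rw [pvColMask_bit, Nat.testBit_two_pow_sub_one]
      have hvm : ∀ x : Int, ((pvVmask fd.items).getD x 0).testBit j = fd.items[j].2.contains x := by
        intro x
        have := pvVmask_bit x fd.items 0 PySem.Dict.empty j hj
        simp only [Nat.zero_add] at this
        rw [pvVmask] at *
        rw [this]
        simp [PySem.Dict.getD_empty, Nat.zero_testBit]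
      have : column.all (fun x => ((pvVmask fd.items).getD x 0).testBit j)
          = column.all (fun x => fd.items[j].2.contains x) := by
        rw [Bool.eq_iff_iff, List.all_eq_true, List.all_eq_true]
        constructor <;> intro hh x hx
        · rw [← hvm x]; exact hh x hx
        · rw [hvm x]; exact hh x hx
      simp only [Nat.zero_add]
      rw [this]
      simp [hjn]
    · exact pvColMask_lt _ column _ (Nat.sub_lt hdlt0 (by norm_num))
  have L := pvLoop_bisim names hkeys (names.length + 1) _ _ _ 0 _ hF ht0 hlen0 hdlt0 hdone0
  have hsz : fd.size = names.length := by
    show fd.items.length = names.length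
    omega
  rw [hsz, L.1]
  rw [pvZipIdxMap names _ 0 (by simpa using L.2)]
  rw [List.drop_zero]

-- ===== VERDICT (by name: the statement is the Claim_ definition above) =====
theorem analyse_columns_spec : Claim_equal_analyse_columns := by
  intro fields pivot _
  exact pvMain fields pivot
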